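-- pv_equiv track=rewrite | github.com/borninachenil/TER2024 | template.py | existe
-- ===== SOURCE A (Python) =====
-- def existe(term, mots):
--     term_words = term.split()
--     if not term_words:
--         return -1
--     term_length = len(term_words)
--
--     for i in range(len(mots) - term_length + 1):
--         if mots[i] == term_words[0]:
--             match = True
--             for j in range(1, term_length):
--                 if i + j >= len(mots) or mots[i + j] != term_words[j]:
--                     match = False
--                     break
--             if match:
--                 return i
--     return -1
-- ===== SOURCE B (Python) =====
-- def existe(term, mots):
--     pat = term.split()
--     if not pat:
--         return -1
--     m = len(pat)
--     res = -1
--     for i in range(len(mots) - m, -1, -1):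
--         if mots[i:i+m] == pat:
--             res = i
--     return res
-- ===== Notes on version B (the rewrite author's own statement) =====
-- stated objective: alternative
-- what changed: B iterates over window start positions right-to-left with an accumulator that keeps the leftmost match and compares each window by whole-slice equality, instead of A's left-to-right scan with a first-word test, a nested per-word inner loop and early return.
import Mathlib
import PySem

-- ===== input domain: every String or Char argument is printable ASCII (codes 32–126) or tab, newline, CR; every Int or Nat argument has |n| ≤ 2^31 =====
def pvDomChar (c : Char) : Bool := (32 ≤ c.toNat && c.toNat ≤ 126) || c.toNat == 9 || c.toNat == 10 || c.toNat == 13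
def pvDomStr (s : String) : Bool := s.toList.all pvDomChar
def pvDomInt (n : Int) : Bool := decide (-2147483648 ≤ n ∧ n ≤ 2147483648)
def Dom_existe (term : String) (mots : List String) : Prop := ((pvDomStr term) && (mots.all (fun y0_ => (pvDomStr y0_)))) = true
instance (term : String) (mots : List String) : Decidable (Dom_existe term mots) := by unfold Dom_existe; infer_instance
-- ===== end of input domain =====

-- B replaces A's left-to-right scan (first-word test + nested per-word inner loop + early return)
-- by a right-to-left fold keeping the leftmost whole-slice match; same result, different traversal.

-- ===== PORT A =====
-- inner 'for j in range(1, term_length)' building the 'match' flag with break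
def existeInnerA (tw mots : List String) (i : Int) : List Int → Bool
  | [] => true
  | j :: rest =>
      if i + j ≥ (mots.length : Int) ∨ PySem.List.pyGet? mots (i + j) ≠ PySem.List.pyGet? tw j then
        false
      else existeInnerA tw mots i rest

-- outer 'for i in range(len(mots) - term_length + 1)' with early return
def existeLoopA (tw mots : List String) : List Int → Int
  | [] => -1
  | i :: rest =>
      if PySem.List.pyGet? mots i = PySem.List.pyGet? tw 0 then
        if existeInnerA tw mots i (PySem.List.pyRange 1 tw.length 1) then i
        else existeLoopA tw mots rest
      else existeLoopA tw mots rest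

def existe (term : String) (mots : List String) : Int :=
  let tw := PySem.Str.split₀ term
  if tw = [] then -1
  else existeLoopA tw mots (PySem.List.pyRange 0 ((mots.length : Int) - tw.length + 1) 1)

-- ===== PORT B =====
def existe_alt (term : String) (mots : List String) : Int :=
  let pat := PySem.Str.split₀ term
  if pat = [] then -1
  else
    (PySem.List.pyRange ((mots.length : Int) - pat.length) (-1) (-1)).foldl
      (fun res i =>
        if PySem.List.slice mots (some i) (some (i + (pat.length : Int))) = pat then i else res)
      (-1)

-- ===== PRECONDITION & SPEC =====
def Spec_existe (term : String) (mots : List String) (out : Int) : Prop := out = existe_alt term mots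
instance (term : String) (mots : List String) (out : Int) : Decidable (Spec_existe term mots out) := by unfold Spec_existe; infer_instance

-- ===== CLAIM (what is proved, stated in full; the proofs are below) =====
def Claim_equal_existe : Prop := ∀ (term : String) (mots : List String), Dom_existe term mots → Spec_existe term mots (existe term mots)

-- ===== LEMMAS AND PROOFS =====

theorem innerA_eq_true_iff (tw mots : List String) (i : Int) (L : List Int) :
    existeInnerA tw mots i L = true ↔
      ∀ j ∈ L, i + j < (mots.length : Int) ∧
        PySem.List.pyGet? mots (i + j) = PySem.List.pyGet? tw j := by
  induction L with
  | nil => simp [existeInnerA]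
  | cons j rest ih =>
    by_cases h : i + j ≥ (mots.length : Int) ∨ PySem.List.pyGet? mots (i + j) ≠ PySem.List.pyGet? tw j
    · simp only [existeInnerA, if_pos h]
      constructor
      · intro hfalse; exact absurd hfalse (by simp)
      · intro hall
        rcases hall j (by simp) with ⟨h1, h2⟩
        rcases h with h | h
        · omega
        · exact absurd h2 h
    · push Not at h
      have hcond : ¬(i + j ≥ (mots.length : Int) ∨
          PySem.List.pyGet? mots (i + j) ≠ PySem.List.pyGet? tw j) := by
        rw [not_or]
        exact ⟨by omega, by simpa using h.2⟩
      simp only [existeInnerA, if_neg hcond, ih]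
      constructor
      · intro hall k hk
        rcases List.mem_cons.mp hk with rfl | hk
        · exact ⟨by omega, h.2⟩
        · exact hall k hk
      · intro hall k hk; exact hall k (List.mem_cons_of_mem _ hk)

theorem slice_eq_iff (mots pat : List String) (i : Int) (hi : 0 ≤ i)
    (_hle : i + (pat.length : Int) ≤ (mots.length : Int)) :
    PySem.List.slice mots (some i) (some (i + (pat.length : Int))) = pat ↔
      ∀ j ∈ PySem.List.pyRange 0 (pat.length : Int) 1,
        PySem.List.pyGet? mots (i + j) = PySem.List.pyGet? pat j := by
  have ha : i = ((i.toNat : Nat) : Int) := by omega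
  rw [PySem.List.slice_toNat mots hi (by omega)]
  have htn : (i + (pat.length : Int)).toNat - i.toNat = pat.length := by omega
  rw [htn]
  constructor
  · intro heq j hj
    rw [PySem.List.mem_pyRange_one] at hj
    have hj0 : 0 ≤ j := hj.1
    have hjm : j < (pat.length : Int) := hj.2
    have hij : i + j = ((i.toNat + j.toNat : Nat) : Int) := by omega
    rw [hij, PySem.List.pyGet?_natCast]
    have hjn : j = ((j.toNat : Nat) : Int) := by omega
    rw [hjn, PySem.List.pyGet?_natCast]
    rw [← heq]
    rw [List.getElem?_take, List.getElem?_drop]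
    simp only [if_pos (show j.toNat < pat.length by omega)]
    rw [Int.toNat_natCast]
  · intro hall
    apply List.ext_getElem?
    intro k
    by_cases hk : k < pat.length
    · have := hall ((k : Nat) : Int) (by rw [PySem.List.mem_pyRange_one]; constructor <;> omega)
      have hij : i + ((k : Nat) : Int) = ((i.toNat + k : Nat) : Int) := by omega
      rw [hij, PySem.List.pyGet?_natCast, PySem.List.pyGet?_natCast] at this
      rw [List.getElem?_take, List.getElem?_drop, if_pos hk]
      exact this
    · rw [List.getElem?_eq_none, List.getElem?_eq_none]
      · omega
      · have hlen : ((mots.drop i.toNat).take pat.length).length ≤ pat.length := by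
          simp [List.length_take]
        omega

theorem check_iff (tw mots : List String) (i : Int) (htw : tw ≠ []) (hi : 0 ≤ i)
    (hle : i + (tw.length : Int) ≤ (mots.length : Int)) :
    (PySem.List.pyGet? mots i = PySem.List.pyGet? tw 0 ∧
      existeInnerA tw mots i (PySem.List.pyRange 1 (tw.length : Int) 1) = true) ↔
      PySem.List.slice mots (some i) (some (i + (tw.length : Int))) = tw := by
  have hm : 0 < tw.length := List.length_pos_iff.mpr htw
  rw [slice_eq_iff mots tw i hi hle, innerA_eq_true_iff]
  have hsplit : PySem.List.pyRange 0 (tw.length : Int) 1 =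
      0 :: PySem.List.pyRange 1 (tw.length : Int) 1 := by
    rw [PySem.List.pyRange_one_cons (by exact_mod_cast hm)]
    norm_num
  rw [hsplit]
  constructor
  · intro ⟨h0, hrest⟩ j hj
    rcases List.mem_cons.mp hj with rfl | hj
    · simpa using h0
    · exact (hrest j hj).2
  · intro hall
    constructor
    · have := hall 0 (by simp)
      simpa using this
    · intro j hj
      have hjr := (PySem.List.mem_pyRange_one).mp hj
      exact ⟨by omega, hall j (List.mem_cons_of_mem _ hj)⟩

theorem loopA_eq (tw mots : List String) (htw : tw ≠ []) (L : List Int)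
    (h : ∀ i ∈ L, 0 ≤ i ∧ i + (tw.length : Int) ≤ (mots.length : Int)) :
    existeLoopA tw mots L =
      L.foldr (fun i res =>
        if PySem.List.slice mots (some i) (some (i + (tw.length : Int))) = tw then i else res)
        (-1) := by
  induction L with
  | nil => rfl
  | cons i rest ih =>
    have hb := h i (List.mem_cons_self)
    have hiff := check_iff tw mots i htw hb.1 hb.2
    have ihr := ih (fun j hj => h j (List.mem_cons_of_mem _ hj))
    simp only [existeLoopA, List.foldr]
    by_cases hp : PySem.List.slice mots (some i) (some (i + (tw.length : Int))) = tw
    · rcases hiff.mpr hp with ⟨h1, h2⟩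
      rw [if_pos h1, if_pos h2, if_pos hp]
    · rw [if_neg hp]
      by_cases h1 : PySem.List.pyGet? mots i = PySem.List.pyGet? tw 0
      · rw [if_pos h1]
        have h2 : existeInnerA tw mots i (PySem.List.pyRange 1 (tw.length : Int) 1) ≠ true := by
          intro h2; exact hp (hiff.mp ⟨h1, h2⟩)
        rw [if_neg h2]; exact ihr
      · rw [if_neg h1]; exact ihr

theorem existe_eq_alt (term : String) (mots : List String) :
    existe term mots = existe_alt term mots := by
  unfold existe existe_alt
  by_cases htw : PySem.Str.split₀ term = []
  · simp [htw]
  · simp only [htw, if_false]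
    set tw := PySem.Str.split₀ term with htwdef
    have hrev : PySem.List.pyRange ((mots.length : Int) - tw.length) (-1) (-1) =
        (PySem.List.pyRange 0 ((mots.length : Int) - tw.length + 1) 1).reverse := by
      rw [PySem.List.pyRange_neg_one_eq_reverse]
      norm_num
    rw [hrev, List.foldl_reverse]
    exact loopA_eq tw mots htw _ (fun i hi => by
      have := (PySem.List.mem_pyRange_one).mp hi
      exact ⟨this.1, by omega⟩)

-- ===== VERDICT (by name: the statement is the Claim_ definition above) =====
theorem existe_spec : Claim_equal_existe := by
  intro term mots _
  unfold Spec_existe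
  exact existe_eq_alt term mots
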